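-- pv_equiv track=rewrite | github.com/yuxin101/skills | skills/jcwang502/cloudflare-mail-address-creator/scripts/create_address.py | summarize_results
-- ===== SOURCE A (Python) =====
-- def summarize_results(results: list[dict]) -> dict:
--     created = sum(1 for item in results if item["status"] == "created")
--     already_exists = sum(1 for item in results if item["status"] == "already_exists")
--     failed = sum(1 for item in results if item["status"] not in {"created", "already_exists"})
--     return {
--         "requested": len(results),
--         "created": created,
--         "already_exists": already_exists,
--         "failed": failed,
--     }
-- ===== SOURCE B (Python) =====
-- def summarize_results(results: list[dict]) -> dict:
--     created = already_exists = failed = 0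
--     for item in results:
--         status = item["status"]
--         if status == "created":
--             created += 1
--         elif status == "already_exists":
--             already_exists += 1
--         else:
--             failed += 1
--     return {
--         "requested": len(results),
--         "created": created,
--         "already_exists": already_exists,
--         "failed": failed,
--     }
-- ===== Notes on version B (the rewrite author's own statement) =====
-- stated objective: simpler
-- what changed: Replaces A's three separate filtered scans over results with one single pass that reads each item's status once and buckets it via if/elif/else into three counters.
import Mathlib
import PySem

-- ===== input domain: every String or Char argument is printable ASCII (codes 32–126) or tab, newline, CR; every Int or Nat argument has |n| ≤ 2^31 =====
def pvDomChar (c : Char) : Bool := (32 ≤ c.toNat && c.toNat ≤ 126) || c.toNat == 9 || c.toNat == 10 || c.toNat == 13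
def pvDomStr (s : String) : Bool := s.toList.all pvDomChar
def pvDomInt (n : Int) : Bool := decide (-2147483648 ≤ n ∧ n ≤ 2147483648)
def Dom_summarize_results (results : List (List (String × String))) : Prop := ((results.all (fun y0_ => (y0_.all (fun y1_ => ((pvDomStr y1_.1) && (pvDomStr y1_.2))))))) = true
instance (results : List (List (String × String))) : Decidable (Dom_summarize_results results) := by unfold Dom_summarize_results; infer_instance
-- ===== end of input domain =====

-- B replaces A's three filtered scans by one single-pass if/elif/else bucketing loop (objective: simpler).

-- item["status"]: first-match association-list lookup (dict as assoc list); none = KeyError, excluded by Pre_.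
def pvStatus (item : List (String × String)) : Option String :=
  (item.find? (fun p => p.1 == "status")).map (·.2)

-- ===== PORT A =====
def summarize_results (results : List (List (String × String))) : List (String × Int) :=
  let created : Int := (results.filter (fun item => (pvStatus item).getD "" == "created")).length
  let already_exists : Int := (results.filter (fun item => (pvStatus item).getD "" == "already_exists")).length
  let failed : Int := (results.filter (fun item =>
      !((pvStatus item).getD "" == "created" || (pvStatus item).getD "" == "already_exists"))).length
  [("requested", (results.length : Int)), ("created", created),
   ("already_exists", already_exists), ("failed", failed)]

-- ===== PORT B =====
def sr_step (acc : Int × Int × Int) (item : List (String × String)) : Int × Int × Int :=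
  let status := (pvStatus item).getD ""
  if status == "created" then (acc.1 + 1, acc.2.1, acc.2.2)
  else if status == "already_exists" then (acc.1, acc.2.1 + 1, acc.2.2)
  else (acc.1, acc.2.1, acc.2.2 + 1)

def summarize_results_alt (results : List (List (String × String))) : List (String × Int) :=
  let acc := results.foldl sr_step (0, 0, 0)
  [("requested", (results.length : Int)), ("created", acc.1),
   ("already_exists", acc.2.1), ("failed", acc.2.2)]

-- ===== PRECONDITION & SPEC =====
-- Pre_ excludes items without a "status" key, on which the Python A raises KeyError.
def Pre_summarize_results (results : List (List (String × String))) : Prop :=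
  ∀ item ∈ results, (item.any (fun p => p.1 == "status")) = true
instance (results : List (List (String × String))) : Decidable (Pre_summarize_results results) := by
  unfold Pre_summarize_results; infer_instance

def pvWitness_summarize_results : (List (List (String × String))) :=
  [[("status", "created")], [("status", "nope"), ("x", "y")]]

def Spec_summarize_results (results : List (List (String × String))) (out : List (String × Int)) : Prop := out = summarize_results_alt results
instance (results : List (List (String × String))) (out : List (String × Int)) : Decidable (Spec_summarize_results results out) := by unfold Spec_summarize_results; infer_instance

-- ===== CLAIM (what is proved, stated in full; the proofs are below) =====
def Claim_equal_summarize_results : Prop := ∀ (results : List (List (String × String))), Dom_summarize_results results → Pre_summarize_results results → Spec_summarize_results results (summarize_results results)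

-- ===== LEMMAS AND PROOFS =====
theorem sr_fold_eq (results : List (List (String × String))) (c ae f : Int) :
    results.foldl sr_step (c, ae, f) =
      (c + ((results.filter (fun item => (pvStatus item).getD "" == "created")).length : Int),
       ae + ((results.filter (fun item => (pvStatus item).getD "" == "already_exists")).length : Int),
       f + ((results.filter (fun item =>
          !((pvStatus item).getD "" == "created" || (pvStatus item).getD "" == "already_exists"))).length : Int)) := by
  induction results generalizing c ae f with
  | nil => simp
  | cons x xs ih =>
    simp only [List.foldl_cons, List.filter_cons, sr_step]
    by_cases h1 : ((pvStatus x).getD "" == "created") = true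
    · have hs : (pvStatus x).getD "" = "created" := by simpa using h1
      simp [hs, ih]; omega
    · by_cases h2 : ((pvStatus x).getD "" == "already_exists") = true
      · have hs : (pvStatus x).getD "" = "already_exists" := by simpa using h2
        simp [hs, ih]; omega
      · simp [h1, h2, ih]; omega

-- ===== VERDICT (by name: the statement is the Claim_ definition above) =====
theorem summarize_results_spec : Claim_equal_summarize_results := by
  intro results _ _
  show summarize_results results = summarize_results_alt results
  simp [summarize_results, summarize_results_alt, sr_fold_eq]
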